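/-
  THE INSTANCES OF THE BLOCK PREDICATE `Blk` THAT A RUN USES (the abstract notion and its laws: Vorbis/Blocks.lean).

      Arena.Blk A                 the setup blocks of the arena ghost (Vorbis/Arena.lean §7: `ArenaOK.blkOK`, `ArenaOK.blkLive`,
                                  `Arena.Blk.mono`): everything `setup_malloc` ever returned, PERMANENT (AR7)
      listBlk (fixedBlocks len)   the input, the output, the six globals: `fixed_ok`, `fixed_live` (from P1)
      listBlk [objBlock p]        the stack object `p` of stb_vorbis_open_memory, while its frame is active
      runBlk A extra              = `Blk.or A.Blk (listBlk extra)`: what a contract instantiates `Blk` with.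
                                  `ArenaOK.runBlk_ok` (the laws: the arena's blocks and the others do not meet — AR6x for
                                  objects of `others`, AR1x for stack objects), `ArenaOK.runBlk_live`, `runBlk_mono` (AR7)

  WHICH `Blk` WHEN.  During start_decoder (the object is `&p` on the stack): `runBlk A (objBlock p :: fixedBlocks len)`.
  From P5 on (the object is a setup block): `runBlk A (fixedBlocks len)`; `objBlock p` leaves the predicate with
  `VorbisOK.reblk` (Vorbis/Invariant.lean) when stb_vorbis_open_memory returns. A frame's own stack objects (`error`, `ch`, `len`,
  `left`, `residue_buffers` …) are never in `Blk`: no clause of the invariant mentions them; their check sites come from the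
  shadow layer directly (`ShadowInv.live_frame` + `Site.of_block`).
-/
import Vorbis.State
import Vorbis.Arena
import Vorbis.ObjBlock
namespace Vorbis
open X86 X86.User Asan

/-! ### The fixed objects -/

/-- **The objects that are allocated for the whole run**: the input (`len` bytes at 200000H), the output, the six globals. -/
def fixedBlocks (len : Nat) : List Block := inBlock len :: blockOUT :: globalBlocks

/-- The fixed objects are a lawful block predicate: in the data space, pairwise equal or disjoint. -/
theorem fixed_ok (len : Nat) (hlen : len ≤ 0x1FF000) : BlkOK (listBlk (fixedBlocks len)) := by
  apply BlkOK.of_list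
  · intro B hB
    simp only [fixedBlocks, globalBlocks, blockOUT, inBlock, IN, List.mem_cons, List.mem_nil_iff, or_false] at hB
    rcases hB with rfl | rfl | rfl | rfl | rfl | rfl | rfl | rfl <;> simp only [] <;> omega
  · intro B C hB hC
    simp only [fixedBlocks, globalBlocks, blockOUT, inBlock, IN, List.mem_cons, List.mem_nil_iff, or_false] at hB hC
    rcases hB with rfl | rfl | rfl | rfl | rfl | rfl | rfl | rfl <;>
      rcases hC with rfl | rfl | rfl | rfl | rfl | rfl | rfl | rfl <;>
      first
        | exact Or.inl rfl
        | (right; simp only [vblock]; omega)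

/-- The fixed objects are live from point P1 on. -/
theorem fixed_live {Live : Nat → Prop} {mem : Mem} {len : Nat} (h : P1 Live mem len) :
    BlkLive (listBlk (fixedBlocks len)) Live := by
  intro B hB
  simp only [listBlk, fixedBlocks, List.mem_cons] at hB
  rcases hB with rfl | rfl | hg
  · exact h.inp
  · exact h.out
  · exact h.globals B hg

/-- The input is one of the fixed objects (S2 of `Bits`). -/
theorem fixed_in (len : Nat) : listBlk (fixedBlocks len) (inBlock len) := List.mem_cons_self

/-! ### The block predicate of a run -/

/-- **The block predicate a contract uses**: the arena's setup blocks, and a list of other objects (`fixedBlocks len`, with the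
stack object `objBlock p` in front while the decoder object lives on the stack). -/
def runBlk (A : Arena) (extra : List Block) : Block → Prop := Blk.or A.Blk (listBlk extra)

/-- A setup block is allocated. -/
theorem runBlk_setup {A : Arena} {extra : List Block} {B : Block} (h : A.Blk B) : runBlk A extra B := Or.inl h

/-- One of the other objects is allocated. -/
theorem runBlk_extra {A : Arena} {extra : List Block} {B : Block} (h : B ∈ extra) : runBlk A extra B := Or.inr h

/-- **PERMANENCE**: a later arena and a longer list allocate more. The `hB` of every `transfer` across an allocator call. -/
theorem runBlk_mono {A A' : Arena} {extra extra' : List Block} (he : A.Extends A') (hx : ∀ B, B ∈ extra → B ∈ extra') (B : Block)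
    (h : runBlk A extra B) : runBlk A' extra' B := by
  cases h with
  | inl hs => exact Or.inl (hs.mono he)
  | inr hm => exact Or.inr (hx B hm)

namespace ArenaOK
variable {A : Arena} {others : List Obj} {mem : Mem} {f : Nat}

/-- **The laws of the run's block predicate**: the arena's blocks are lawful (`blkOK`), the others are, and no other object
meets the arena `[B, B + L)`. -/
theorem runBlk_ok (h : ArenaOK A others mem f) {extra : List Block} (hx : BlkOK (listBlk extra))
    (hout : ∀ C, C ∈ extra → C.base + C.size ≤ A.B ∨ A.B + A.L ≤ C.base) : BlkOK (runBlk A extra) := by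
  apply BlkOK.or h.blkOK hx
  intro B C hB hC
  right
  have hr := h.block_range hB
  have h2 := h.AR2
  have hl := le_r8 B.size
  have ho := hout C hC
  simp only [vblock]
  omega

/-- An object of `others` that is not an arena block lies outside the arena (AR6x): the `hout` of `runBlk_ok` for the input, the
output, the globals. -/
theorem other_outside (h : ArenaOK A others mem f) {o : Obj} (ho : o ∈ others) (hk1 : o.kind ≠ .setup) (hk2 : o.kind ≠ .temp) :
    o.base + o.size ≤ A.B ∨ A.B + A.L ≤ o.base := by
  rcases h.AR6x o ho with hin | hout
  · rcases Arena.mem_objs hin with ⟨b, _, e⟩ | ⟨b, _, e⟩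
    · exact absurd (by rw [e]; rfl) hk1
    · exact absurd (by rw [e]; rfl) hk2
  · exact hout.2.2

/-- A stack object lies outside the arena (AR1x: the arena is off the stack region). -/
theorem stack_outside (h : ArenaOK A others mem f) {C : Block} (hC : 0x700000 ≤ C.base ∧ C.base + C.size ≤ 0x800000) :
    C.base + C.size ≤ A.B ∨ A.B + A.L ≤ C.base := by
  have h1 := h.AR1x
  omega

/-- **Every block of the run's predicate is live**: the arena's by AR6, the others by hypothesis. -/
theorem runBlk_live (h : ArenaOK A others mem f) {objs : List Obj} (hsub : ∀ o, o ∈ others → o ∈ objs) {extra : List Block}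
    (hx : BlkLive (listBlk extra) (Live objs)) : BlkLive (runBlk A extra) (Live objs) :=
  BlkLive.or (h.blkLive hsub) hx

end ArenaOK

/-- The stack object of stb_vorbis_open_memory in front of a list of other objects: lawful when it lies in the stack region and
the others are off it. -/
theorem blkOK_cons_stack {extra : List Block} {p n : Nat} (hx : BlkOK (listBlk extra))
    (hp : 0x700000 ≤ p ∧ p + n ≤ 0x800000) (hoff : ∀ C, C ∈ extra → C.base + C.size ≤ 0x700000 ∨ 0x800000 ≤ C.base) :
    BlkOK (listBlk (⟨p, n⟩ :: extra)) := by
  apply BlkOK.of_list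
  · intro B hB
    rcases List.mem_cons.mp hB with rfl | hm
    · simp only []
      omega
    · exact hx.inside B hm
  · intro B C hB hC
    rcases List.mem_cons.mp hB with rfl | hb
    · rcases List.mem_cons.mp hC with rfl | hc
      · exact Or.inl rfl
      · right
        have := hoff C hc
        simp only [vblock]
        omega
    · rcases List.mem_cons.mp hC with rfl | hc
      · right
        have := hoff B hb
        simp only [vblock]
        omega
      · exact hx.apart B C hb hc

/-- The fixed objects are off the stack region. -/
theorem fixed_off_stack (len : Nat) (hlen : len ≤ 0x1FF000) (C : Block) (hC : C ∈ fixedBlocks len) :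
    C.base + C.size ≤ 0x700000 ∨ 0x800000 ≤ C.base := by
  simp only [fixedBlocks, globalBlocks, blockOUT, inBlock, IN, List.mem_cons, List.mem_nil_iff, or_false] at hC
  rcases hC with rfl | rfl | rfl | rfl | rfl | rfl | rfl | rfl <;> simp only [] <;> omega

end Vorbis
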